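-- pv_equiv track=rewrite | github.com/StefftheEmperor2/pyload | src/pyload/plugins/hoster/StreamCz.py | get_link_quality
-- ===== SOURCE A (Python) =====
-- def get_link_quality(videos, quality):
--     quality_index = ["144p", "240p", "360p", "480p", "720p", "1080p"]
--     quality = quality_index.index(quality)
--
--     link = None
--     while quality >= 0:
--         if len(videos) >= quality + 1:
--             link = videos[quality]
--             break
--
--         else:
--             quality -= 1
--
--     return link
-- ===== SOURCE B (Python) =====
-- def get_link_quality(videos, quality):
--     quality_index = ["144p", "240p", "360p", "480p", "720p", "1080p"]
--     q = quality_index.index(quality)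
--     return videos[min(q, len(videos) - 1)] if videos else None
-- ===== Notes on version B (the rewrite author's own statement) =====
-- stated objective: simpler
-- what changed: Replaced the decrement-and-test while-loop with a closed-form index: videos[min(q, len(videos)-1)] when videos is non-empty, else None.
import Mathlib
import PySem

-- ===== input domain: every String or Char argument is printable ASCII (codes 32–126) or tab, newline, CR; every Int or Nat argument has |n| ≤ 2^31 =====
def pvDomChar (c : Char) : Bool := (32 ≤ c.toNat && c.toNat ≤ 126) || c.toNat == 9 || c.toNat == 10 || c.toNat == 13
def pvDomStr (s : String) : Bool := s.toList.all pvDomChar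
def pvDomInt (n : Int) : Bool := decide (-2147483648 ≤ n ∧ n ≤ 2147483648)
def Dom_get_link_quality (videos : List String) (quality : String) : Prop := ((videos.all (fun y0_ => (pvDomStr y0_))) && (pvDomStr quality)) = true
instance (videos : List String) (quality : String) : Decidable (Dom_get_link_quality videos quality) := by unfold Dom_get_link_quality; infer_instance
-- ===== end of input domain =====

-- B replaces A's decrement-and-test while-loop by a closed-form index (simpler, not claimed faster).

-- ===== PORT A =====
-- the while-loop of A: quality counts down from q; stops when len(videos) >= quality+1 or quality < 0
def get_link_quality_loop (videos : List String) (q : Nat) : Option String :=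
  if videos.length ≥ q + 1 then PySem.List.pyGet? videos (q : Int)
  else
    match q with
    | 0 => none           -- quality becomes -1: loop exits with link = None
    | q' + 1 => get_link_quality_loop videos q'

def get_link_quality (videos : List String) (quality : String) : Option String :=
  match PySem.List.index? ["144p", "240p", "360p", "480p", "720p", "1080p"] quality with
  | none => none          -- ValueError; excluded by Pre_
  | some q => get_link_quality_loop videos q

-- ===== PORT B =====
def get_link_quality_alt (videos : List String) (quality : String) : Option String :=
  match PySem.List.index? ["144p", "240p", "360p", "480p", "720p", "1080p"] quality with
  | none => none          -- ValueError; excluded by Pre_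
  | some q =>
    if videos = [] then none
    else PySem.List.pyGet? videos (min (q : Int) ((videos.length : Int) - 1))

-- ===== PRECONDITION & SPEC =====
-- Pre_ excludes quality strings not among the six known levels, on which A raises ValueError.
def Pre_get_link_quality (videos : List String) (quality : String) : Prop :=
  quality ∈ ["144p", "240p", "360p", "480p", "720p", "1080p"]
instance (videos : List String) (quality : String) : Decidable (Pre_get_link_quality videos quality) := by unfold Pre_get_link_quality; infer_instance

def pvWitness_get_link_quality : List String × String := (["a", "b"], "480p")

def Spec_get_link_quality (videos : List String) (quality : String) (out : Option String) : Prop := out = get_link_quality_alt videos quality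
instance (videos : List String) (quality : String) (out : Option String) : Decidable (Spec_get_link_quality videos quality out) := by unfold Spec_get_link_quality; infer_instance

-- ===== CLAIM (what is proved, stated in full; the proofs are below) =====
def Claim_equal_get_link_quality : Prop := ∀ (videos : List String) (quality : String), Dom_get_link_quality videos quality → Pre_get_link_quality videos quality → Spec_get_link_quality videos quality (get_link_quality videos quality)

-- ===== LEMMAS AND PROOFS =====
lemma loop_eq_closed (videos : List String) (q : Nat) :
    get_link_quality_loop videos q =
      (if videos = [] then none
       else PySem.List.pyGet? videos (min (q : Int) ((videos.length : Int) - 1))) := by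
  induction q with
  | zero =>
    unfold get_link_quality_loop
    cases videos with
    | nil => simp
    | cons x xs =>
      have : (x :: xs).length ≥ 0 + 1 := by simp
      simp only [if_pos this, if_neg (by simp : ¬ (x :: xs) = [])]
      congr 1
      omega
  | succ q' ih =>
    unfold get_link_quality_loop
    by_cases h : videos.length ≥ q' + 1 + 1
    · have hne : videos ≠ [] := by intro hv; rw [hv] at h; simp at h
      simp only [if_pos h, if_neg hne]
      congr 1
      push_cast
      omega
    · simp only [if_neg h, ih]
      split
      · rfl
      · rename_i hne
        congr 1
        push_cast
        have hlen : 1 ≤ videos.length := by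
          cases videos with
          | nil => exact absurd rfl hne
          | cons a l => simp
        omega

-- ===== VERDICT (by name: the statement is the Claim_ definition above) =====
theorem get_link_quality_spec : Claim_equal_get_link_quality := by
  intro videos quality _ _
  unfold Spec_get_link_quality get_link_quality get_link_quality_alt
  cases h : PySem.List.index? ["144p", "240p", "360p", "480p", "720p", "1080p"] quality with
  | none => rfl
  | some q => exact loop_eq_closed videos q
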